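-- pv_equiv track=rewrite | github.com/davidpc99/TFM | src/dictionaries.py | delete_meaning_numbers
-- ===== SOURCE A (Python) =====
-- def delete_meaning_numbers(entry, meaning_positions):
--         entry_without_numbers = []
--         start = 0
--         for start_end in meaning_positions:
--             if start !=0:
--                 end = start_end[0]
--                 entry_without_numbers.append(entry[start+1:end-1])
--             start =  start_end[1]
--         entry_without_numbers.append(entry[start+1:])
--
--         return entry_without_numbers
-- ===== SOURCE B (Python) =====
-- def delete_meaning_numbers(entry, meaning_positions):
--     def go(prev_end, positions):
--         if not positions:
--             return [entry[prev_end + 1:]]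
--         (s, e) = positions[0]
--         middle = [] if prev_end == 0 else [entry[prev_end + 1:s - 1]]
--         return middle + go(e, positions[1:])
--     return go(0, meaning_positions)
-- ===== Notes on version B (the rewrite author's own statement) =====
-- stated objective: alternative
-- what changed: Replaces the iterative accumulator loop that threads a 'previous end' state variable with a structural recursion over the position list that conses each segment (skipping when the previous end is 0, as A's guard does) and returns the tail slice at the base case.
import Mathlib
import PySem

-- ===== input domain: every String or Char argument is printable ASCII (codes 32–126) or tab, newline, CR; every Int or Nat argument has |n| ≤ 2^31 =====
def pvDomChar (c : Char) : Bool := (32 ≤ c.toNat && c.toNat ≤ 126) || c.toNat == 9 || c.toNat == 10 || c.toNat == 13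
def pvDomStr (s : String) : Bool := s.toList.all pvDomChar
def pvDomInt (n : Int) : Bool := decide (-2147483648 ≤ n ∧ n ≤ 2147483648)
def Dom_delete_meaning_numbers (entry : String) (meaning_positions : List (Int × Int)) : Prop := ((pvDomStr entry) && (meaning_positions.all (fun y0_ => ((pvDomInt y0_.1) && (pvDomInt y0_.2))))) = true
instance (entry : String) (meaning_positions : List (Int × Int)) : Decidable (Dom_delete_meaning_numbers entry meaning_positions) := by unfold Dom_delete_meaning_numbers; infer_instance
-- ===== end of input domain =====

-- B replaces the iterative accumulator loop threading a 'previous end' state variable with a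
-- structural recursion that conses each segment and yields the tail slice at the base case
-- (objective: alternative decomposition, same cost).

-- ===== PORT A =====
def pvSlice (entry : String) (a b : Int) : String := PySem.Str.slice entry (some a) (some b)
def pvSliceFrom (entry : String) (a : Int) : String := PySem.Str.slice entry (some a) none
def pvStepA (entry : String) (st : List String × Int) (start_end : Int × Int) : List String × Int :=
  (if st.2 ≠ 0 then st.1 ++ [pvSlice entry (st.2 + 1) (start_end.1 - 1)] else st.1, start_end.2)

def delete_meaning_numbers (entry : String) (meaning_positions : List (Int × Int)) : List String :=
  let st := meaning_positions.foldl (pvStepA entry) ([], 0)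
  st.1 ++ [pvSliceFrom entry (st.2 + 1)]

-- ===== PORT B =====
-- Source B's inner recursive helper 'go'
def pvGo (entry : String) (prev_end : Int) : List (Int × Int) → List String
  | [] => [pvSliceFrom entry (prev_end + 1)]
  | p :: rest =>
      (if prev_end == 0 then [] else [pvSlice entry (prev_end + 1) (p.1 - 1)]) ++ pvGo entry p.2 rest

def delete_meaning_numbers_alt (entry : String) (meaning_positions : List (Int × Int)) : List String :=
  pvGo entry 0 meaning_positions

-- ===== PRECONDITION & SPEC =====
def Spec_delete_meaning_numbers (entry : String) (meaning_positions : List (Int × Int)) (out : List String) : Prop := out = delete_meaning_numbers_alt entry meaning_positions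
instance (entry : String) (meaning_positions : List (Int × Int)) (out : List String) : Decidable (Spec_delete_meaning_numbers entry meaning_positions out) := by unfold Spec_delete_meaning_numbers; infer_instance

-- ===== CLAIM (what is proved, stated in full; the proofs are below) =====
def Claim_equal_delete_meaning_numbers : Prop := ∀ (entry : String) (meaning_positions : List (Int × Int)), Dom_delete_meaning_numbers entry meaning_positions → Spec_delete_meaning_numbers entry meaning_positions (delete_meaning_numbers entry meaning_positions)

-- ===== LEMMAS AND PROOFS =====

theorem pvLoopA (entry : String) (ps : List (Int × Int)) :
    ∀ (acc : List String) (s : Int),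
    ((ps.foldl (pvStepA entry) (acc, s)).1
      ++ [pvSliceFrom entry ((ps.foldl (pvStepA entry) (acc, s)).2 + 1)])
      = acc ++ pvGo entry s ps := by
  induction ps with
  | nil => intro acc s; simp [pvGo]
  | cons p rest ih =>
      intro acc s
      by_cases hs : s = 0
      · have := ih acc p.2
        simp [List.foldl, pvStepA, pvGo, hs] at this ⊢
        exact this
      · have := ih (acc ++ [pvSlice entry (s + 1) (p.1 - 1)]) p.2
        simp [List.foldl, pvStepA, pvGo, hs] at this ⊢
        exact this

-- ===== VERDICT (by name: the statement is the Claim_ definition above) =====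
theorem delete_meaning_numbers_spec : Claim_equal_delete_meaning_numbers := by
  intro entry ps _
  have := pvLoopA entry ps [] 0
  simpa [delete_meaning_numbers, delete_meaning_numbers_alt] using this
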